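-- pv_equiv track=rewrite | github.com/AdrianSuliga/WDI | Tests/ex_2_20-21.py | calcDist
-- ===== SOURCE A (Python) =====
-- def calcDist(T, i, j):
--     dist = 0
--     n = len(T)
--     for k in range(n):
--         if T[i][k] == T[j][k]: continue # jeśli dwie komórki są takie same to nie wpływają na odległość wierszy
--         if T[i][k] == 1:
--             dist += T[i][k] * 2**(n - k) # jeśli w i. wierszu jest 1 to dodajemy do odl
--             continue
--         if T[j][k] == 1:
--             dist -= T[j][k] * 2**(n - k) # jeśli w j. wierszu jest 1 to odejmujemy od odl
--             continue
--     return abs(dist) # zwracamy bez znaku aby bez problemów porównywać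
-- ===== SOURCE B (Python) =====
-- def calcDist(T, i, j):
--     n = len(T)
--     vi = sum(2 ** (n - k) for k in range(n) if T[i][k] == 1)
--     vj = sum(2 ** (n - k) for k in range(n) if T[j][k] == 1)
--     return abs(vi - vj)
-- ===== Notes on version B (the rewrite author's own statement) =====
-- stated objective: simpler
-- what changed: B computes each row's weighted value independently (sum of 2**(n-k) over columns equal to 1) and returns the absolute difference, replacing A's interleaved per-column three-way comparison with two independent accumulations.
import Mathlib
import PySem

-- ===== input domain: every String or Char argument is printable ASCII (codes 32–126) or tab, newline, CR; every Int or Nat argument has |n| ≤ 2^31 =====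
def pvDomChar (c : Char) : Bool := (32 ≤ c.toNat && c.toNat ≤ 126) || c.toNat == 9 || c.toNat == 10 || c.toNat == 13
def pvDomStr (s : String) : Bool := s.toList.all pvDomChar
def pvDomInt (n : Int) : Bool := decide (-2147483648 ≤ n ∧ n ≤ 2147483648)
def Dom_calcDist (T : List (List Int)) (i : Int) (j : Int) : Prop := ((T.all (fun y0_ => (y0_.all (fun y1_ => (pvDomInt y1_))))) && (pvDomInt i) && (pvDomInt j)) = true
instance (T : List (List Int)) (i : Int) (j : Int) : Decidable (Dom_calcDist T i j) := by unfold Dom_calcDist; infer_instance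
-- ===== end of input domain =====

-- B computes each row's weighted value independently and returns the absolute difference
-- of the two values (simpler decomposition than A's interleaved three-way comparison).


-- ===== PORT A =====
def calcDist (T : List (List Int)) (i : Int) (j : Int) : Int :=
  let n : Int := (T.length : Int)
  let dist : Int := (PySem.List.pyRange 0 n 1).foldl (fun dist k =>
    let a := PySem.List.pyGetD (PySem.List.pyGetD T i []) k 0
    let b := PySem.List.pyGetD (PySem.List.pyGetD T j []) k 0
    if a == b then dist
    else if a == 1 then dist + a * 2 ^ (n - k).toNat
    else if b == 1 then dist - b * 2 ^ (n - k).toNat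
    else dist) 0
  |dist|

-- ===== PORT B =====
def pvRowVal (T : List (List Int)) (r : Int) (n : Int) : Int :=
  (PySem.List.pyRange 0 n 1).foldl (fun s k =>
    if PySem.List.pyGetD (PySem.List.pyGetD T r []) k 0 == 1
    then s + 2 ^ (n - k).toNat else s) 0

def calcDist_alt (T : List (List Int)) (i : Int) (j : Int) : Int :=
  let n : Int := (T.length : Int)
  |pvRowVal T i n - pvRowVal T j n|

-- ===== PRECONDITION & SPEC =====
-- Pre_ excludes exactly the inputs where Python A raises IndexError: a row index i or j
-- outside range for a nonempty T, or an accessed row shorter than len(T).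
def Pre_calcDist (T : List (List Int)) (i : Int) (j : Int) : Prop :=
  T = [] ∨
    (PySem.Raise.InRange T.length i ∧ PySem.Raise.InRange T.length j ∧
     T.length ≤ (PySem.List.pyGetD T i []).length ∧
     T.length ≤ (PySem.List.pyGetD T j []).length)
instance (T : List (List Int)) (i : Int) (j : Int) : Decidable (Pre_calcDist T i j) := by unfold Pre_calcDist; infer_instance

def pvWitness_calcDist : List (List Int) × Int × Int := ([[1, 0], [0, 1]], 0, 1)

def Spec_calcDist (T : List (List Int)) (i : Int) (j : Int) (out : Int) : Prop := out = calcDist_alt T i j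
instance (T : List (List Int)) (i : Int) (j : Int) (out : Int) : Decidable (Spec_calcDist T i j out) := by unfold Spec_calcDist; infer_instance

-- ===== CLAIM (what is proved, stated in full; the proofs are below) =====
def Claim_equal_calcDist : Prop := ∀ (T : List (List Int)) (i : Int) (j : Int), Dom_calcDist T i j → Pre_calcDist T i j → Spec_calcDist T i j (calcDist T i j)

-- ===== LEMMAS AND PROOFS =====

-- shifting the accumulator of B's sum loop
theorem pvRowVal_shift (row : List Int) (n : Int) (ks : List Int) (s : Int) :
    ks.foldl (fun s k => if PySem.List.pyGetD row k 0 == 1 then s + 2 ^ (n - k).toNat else s) s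
      = s + ks.foldl (fun s k => if PySem.List.pyGetD row k 0 == 1 then s + 2 ^ (n - k).toNat else s) 0 := by
  induction ks generalizing s with
  | nil => simp
  | cons k ks ih =>
    simp only [List.foldl_cons]
    rw [ih]
    conv_rhs => rw [ih]
    split <;> ring

-- A's interleaved loop equals the difference of B's two independent sums
theorem pv_main (ri rj : List Int) (n : Int) (ks : List Int) (d : Int) :
    ks.foldl (fun dist k =>
      let a := PySem.List.pyGetD ri k 0
      let b := PySem.List.pyGetD rj k 0
      if a == b then dist
      else if a == 1 then dist + a * 2 ^ (n - k).toNat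
      else if b == 1 then dist - b * 2 ^ (n - k).toNat
      else dist) d
    = d + ks.foldl (fun s k => if PySem.List.pyGetD ri k 0 == 1 then s + 2 ^ (n - k).toNat else s) 0
        - ks.foldl (fun s k => if PySem.List.pyGetD rj k 0 == 1 then s + 2 ^ (n - k).toNat else s) 0 := by
  induction ks generalizing d with
  | nil => simp
  | cons k ks ih =>
    simp only [List.foldl_cons]
    rw [ih]
    conv_rhs => rw [pvRowVal_shift ri n ks, pvRowVal_shift rj n ks]
    simp only [beq_iff_eq]
    rcases eq_or_ne (PySem.List.pyGetD ri k 0) 1 with ha | ha <;>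
      rcases eq_or_ne (PySem.List.pyGetD rj k 0) 1 with hb | hb
    · rw [if_pos (ha.trans hb.symm), if_pos ha, if_pos hb]; ring
    · have hab : ¬ PySem.List.pyGetD ri k 0 = PySem.List.pyGetD rj k 0 :=
        fun h => hb (h.symm.trans ha)
      rw [if_neg hab, if_pos ha, ha, if_neg hb, if_pos rfl]; ring
    · have hab : ¬ PySem.List.pyGetD ri k 0 = PySem.List.pyGetD rj k 0 :=
        fun h => ha (h.trans hb)
      rw [if_neg hab, if_neg ha, if_pos hb, hb, if_neg ha, if_pos rfl]; ring
    · by_cases hab : PySem.List.pyGetD ri k 0 = PySem.List.pyGetD rj k 0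
      · rw [if_pos hab, if_neg ha, if_neg hb]; ring
      · rw [if_neg hab, if_neg ha, if_neg hb, if_neg ha, if_neg hb]; ring

-- ===== VERDICT (by name: the statement is the Claim_ definition above) =====
theorem calcDist_spec : Claim_equal_calcDist := by
  intro T i j _ _
  unfold Spec_calcDist calcDist calcDist_alt pvRowVal
  simp only []
  rw [pv_main]
  ring_nf
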